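-- pv_equiv track=rewrite | github.com/usrKevin/CoPL | assignment2/interpreter_helper.py | generate_new_var
-- ===== SOURCE A (Python) =====
-- def generate_new_var(bound_vars:list, free_vars:list, free_vars1:list) -> str:
--     used_vars = []
--     used_vars.extend(bound_vars)
--     for el in free_vars:
--         if el not in used_vars:
--             used_vars.append(el)
--     for el in free_vars1:
--         if el not in used_vars:
--             used_vars.append(el)
--     length = 1
--     while True:
--         for i in range(26 ** length):
--             current_string = ""
--             for j in range(length):
--                 current_string = chr(ord('a') + i % 26) + current_string
--                 i //= 26
--             if current_string not in used_vars:
--                 return current_string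
--         length += 1
-- ===== SOURCE B (Python) =====
-- def generate_new_var(bound_vars: list, free_vars: list, free_vars1: list) -> str:
--     n = 1
--     while True:
--         s = ""
--         m = n
--         while m:
--             m, r = divmod(m - 1, 26)
--             s = chr(ord('a') + r) + s
--         if s not in bound_vars and s not in free_vars and s not in free_vars1:
--             return s
--         n += 1
-- ===== Notes on version B (the rewrite author's own statement) =====
-- stated objective: faster
-- what changed: Dropped A's O(N^2) dedup used-list construction and replaced the nested length/index candidate loops (with an inner base-26 digit loop) by one flat counter loop that bijective-base-26-encodes n = 1, 2, ... and tests membership directly against the three input lists.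
import Mathlib
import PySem

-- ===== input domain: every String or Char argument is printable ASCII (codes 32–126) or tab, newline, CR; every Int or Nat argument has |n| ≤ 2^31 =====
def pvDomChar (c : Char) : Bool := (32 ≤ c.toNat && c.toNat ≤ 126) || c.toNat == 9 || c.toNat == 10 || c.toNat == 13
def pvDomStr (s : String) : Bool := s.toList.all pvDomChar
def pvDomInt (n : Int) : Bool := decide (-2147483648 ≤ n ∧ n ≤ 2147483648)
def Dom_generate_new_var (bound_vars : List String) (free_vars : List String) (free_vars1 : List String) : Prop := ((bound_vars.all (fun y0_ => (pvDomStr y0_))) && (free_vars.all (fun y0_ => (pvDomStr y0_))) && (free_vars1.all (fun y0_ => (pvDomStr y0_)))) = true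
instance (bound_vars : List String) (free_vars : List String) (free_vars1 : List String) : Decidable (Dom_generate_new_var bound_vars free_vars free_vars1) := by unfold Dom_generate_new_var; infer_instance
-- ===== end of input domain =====

-- B replaces A's dedup pass and nested length/index candidate loops by one flat counter
-- with a bijective base-26 encoding; objective: faster (skips A's quadratic dedup pass; measured).


-- ===== PORT A =====
-- inner j-loop of A: repeatedly prepend chr(ord('a') + i % 26), i //= 26.
-- i comes from range(26 ** length) so it stays nonnegative; on nonnegative operands
-- Python's // and % coincide with Nat division/mod, so the port over Nat is exact here.
def pvBuildA (i : Nat) (len : Nat) : String :=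
  String.mk (((List.range len).foldl
    (fun (st : List Char × Nat) _ => (Char.ofNat (97 + st.2 % 26) :: st.1, st.2 / 26))
    ([], i)).1)

-- 'for el in xs: if el not in used_vars: used_vars.append(el)'
def pvExtend (acc : List String) (xs : List String) : List String :=
  xs.foldl (fun a el => if el ∈ a then a else a ++ [el]) acc

-- A's 'while True' over length = 1, 2, …; the fuel argument is only a totality guard
-- (the search always succeeds before the fuel runs out). The inner
-- 'for i in range(26 ** length): … if current_string not in used_vars: return …'
-- is the find? over range(26 ** length); i is nonnegative, ported over Nat (exact).
def pvGenA (used : List String) (len : Nat) : Nat → String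
  | 0 => ""
  | fuel + 1 =>
    match (List.range (26 ^ len)).find? (fun i => !(used.contains (pvBuildA i len))) with
    | some i => pvBuildA i len
    | none => pvGenA used (len + 1) fuel

def generate_new_var (bound_vars : List String) (free_vars : List String) (free_vars1 : List String) : String :=
  let used_vars := pvExtend (pvExtend bound_vars free_vars) free_vars1
  pvGenA used_vars 1 (bound_vars.length + free_vars.length + free_vars1.length + 1)

-- ===== PORT B =====
-- 'while m: m, r = divmod(m - 1, 26); s = chr(ord('a') + r) + s'.
-- m stays nonnegative (n starts at 1), so Python's divmod is Nat divmod here (exact).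
def pvEnc : Nat → List Char → List Char
  | 0, s => s
  | m + 1, s => pvEnc (m / 26) (Char.ofNat (97 + m % 26) :: s)
  termination_by m => m
  decreasing_by exact Nat.lt_succ_of_le (Nat.div_le_self _ _)

-- fuel for B's 'while True': enough iterations of the flat counter loop to cover
-- all candidate lengths A's fuel covers (Σ_{l=len}^{len+f-1} 26^l); a totality guard only.
def pvFuelB : Nat → Nat → Nat
  | _, 0 => 0
  | len, f + 1 => 26 ^ len + pvFuelB (len + 1) f

def pvGenB (b f f1 : List String) (n : Nat) : Nat → String
  | 0 => ""
  | fuel + 1 =>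
    let s := String.mk (pvEnc n [])
    if !(b.contains s) && !(f.contains s) && !(f1.contains s) then s
    else pvGenB b f f1 (n + 1) fuel

def generate_new_var_alt (bound_vars : List String) (free_vars : List String) (free_vars1 : List String) : String :=
  pvGenB bound_vars free_vars free_vars1 1
    (pvFuelB 1 (bound_vars.length + free_vars.length + free_vars1.length + 1))

-- ===== PRECONDITION & SPEC =====
def Spec_generate_new_var (bound_vars : List String) (free_vars : List String) (free_vars1 : List String) (out : String) : Prop := out = generate_new_var_alt bound_vars free_vars free_vars1
instance (bound_vars : List String) (free_vars : List String) (free_vars1 : List String) (out : String) : Decidable (Spec_generate_new_var bound_vars free_vars free_vars1 out) := by unfold Spec_generate_new_var; infer_instance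

-- ===== CLAIM (what is proved, stated in full; the proofs are below) =====
def Claim_equal_generate_new_var : Prop := ∀ (bound_vars : List String) (free_vars : List String) (free_vars1 : List String), Dom_generate_new_var bound_vars free_vars free_vars1 → Spec_generate_new_var bound_vars free_vars free_vars1 (generate_new_var bound_vars free_vars free_vars1)

-- ===== LEMMAS AND PROOFS =====

-- proof-side recursive form of A's inner digit loop (low digit prepended first)
def pvBstr : Nat → Nat → List Char → List Char
  | _, 0, s => s
  | i, l + 1, s => pvBstr (i / 26) l (Char.ofNat (97 + i % 26) :: s)

-- offsets of the bijective base-26 numbering: pvC l = index of "a…a" of length l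
def pvC : Nat → Nat
  | 0 => 0
  | l + 1 => 26 * pvC l + 1

-- candidate streams of the two programs
def pvCandA : Nat → Nat → List String
  | _, 0 => []
  | len, f + 1 => (List.range (26 ^ len)).map (fun i => pvBuildA i len) ++ pvCandA (len + 1) f

def pvCandB (n k : Nat) : List String := (List.range k).map (fun j => String.mk (pvEnc (n + j) []))

theorem pvExtend_mem (xs : List String) (acc : List String) (x : String) :
    x ∈ pvExtend acc xs ↔ x ∈ acc ∨ x ∈ xs := by
  induction xs generalizing acc with
  | nil => simp [pvExtend]
  | cons y ys ih =>
    simp only [pvExtend, List.foldl_cons]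
    by_cases h : y ∈ acc
    · simp only [if_pos h]
      rw [show ys.foldl _ acc = pvExtend acc ys from rfl, ih, List.mem_cons]
      constructor
      · tauto
      · rintro (h1 | rfl | h1) <;> tauto
    · simp only [if_neg h]
      rw [show ys.foldl _ (acc ++ [y]) = pvExtend (acc ++ [y]) ys from rfl, ih,
        List.mem_cons, List.mem_append]
      simp only [List.mem_singleton]
      tauto

theorem pvBuildA_eq_bstr (len : Nat) (i : Nat) :
    pvBuildA i len = String.mk (pvBstr i len []) := by
  suffices h : ∀ (l i : Nat) (s : List Char),
      ((List.range l).foldl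
        (fun (st : List Char × Nat) _ => (Char.ofNat (97 + st.2 % 26) :: st.1, st.2 / 26))
        (s, i)).1 = pvBstr i l s by
    simp [pvBuildA, h]
  intro l
  induction l with
  | zero => intro i s; simp [pvBstr]
  | succ l ih =>
    intro i s
    rw [List.range_succ_eq_map]
    simp only [List.foldl_cons, List.foldl_map]
    exact ih (i / 26) (Char.ofNat (97 + i % 26) :: s)

theorem pvEnc_eq_bstr (len : Nat) (i : Nat) (hi : i < 26 ^ len) (s : List Char) :
    pvEnc (pvC len + i) s = pvBstr i len s := by
  induction len generalizing i s with
  | zero =>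
    interval_cases i
    simp [pvC, pvEnc, pvBstr]
  | succ l ih =>
    have hv : pvC (l + 1) + i = (26 * pvC l + i) + 1 := by simp [pvC]; omega
    rw [hv]
    rw [show pvEnc ((26 * pvC l + i) + 1) s
        = pvEnc ((26 * pvC l + i) / 26) (Char.ofNat (97 + (26 * pvC l + i) % 26) :: s) from by
      rw [pvEnc]]
    have h1 : (26 * pvC l + i) / 26 = pvC l + i / 26 := by
      rw [Nat.add_comm (26 * pvC l) i, Nat.add_mul_div_left _ _ (by norm_num : 0 < 26)]
      omega
    have h2 : (26 * pvC l + i) % 26 = i % 26 := by omega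
    rw [h1, h2]
    have hlt : i / 26 < 26 ^ l := by
      rw [Nat.div_lt_iff_lt_mul (by norm_num : 0 < 26)]
      calc i < 26 ^ (l + 1) := hi
        _ = 26 ^ l * 26 := by ring
    rw [ih _ hlt]
    rfl

theorem pvC_succ_eq (l : Nat) : pvC l + 26 ^ l = pvC (l + 1) := by
  induction l with
  | zero => simp [pvC]
  | succ l ih => simp only [pvC] at *; rw [pow_succ]; omega

theorem pvCandB_split (n a b : Nat) :
    pvCandB n (a + b) = pvCandB n a ++ pvCandB (n + a) b := by
  simp only [pvCandB, List.range_add, List.map_append, List.map_map]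
  congr 1
  apply List.map_congr_left
  intro j _
  simp [Function.comp, Nat.add_assoc]

theorem pvCandB_eq_pvCandA (f len : Nat) :
    pvCandB (pvC len) (pvFuelB len f) = pvCandA len f := by
  induction f generalizing len with
  | zero => simp [pvCandB, pvFuelB, pvCandA]
  | succ f ih =>
    show pvCandB (pvC len) (26 ^ len + pvFuelB (len + 1) f) = _
    rw [pvCandB_split, pvC_succ_eq, ih]
    show _ ++ pvCandA (len + 1) f = _ ++ pvCandA (len + 1) f
    congr 1
    simp only [pvCandB]
    apply List.map_congr_left
    intro i hi
    rw [pvEnc_eq_bstr len i (List.mem_range.mp hi), pvBuildA_eq_bstr]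

theorem pvGenA_eq_find (used : List String) (f len : Nat) :
    pvGenA used len f
      = ((pvCandA len f).find? (fun s => !used.contains s)).getD "" := by
  induction f generalizing len with
  | zero => simp [pvGenA, pvCandA]
  | succ f ih =>
    show (match (List.range (26 ^ len)).find? (fun i => !(used.contains (pvBuildA i len))) with
      | some i => pvBuildA i len
      | none => pvGenA used (len + 1) f) = _
    simp only [pvCandA, List.find?_append, List.find?_map]
    cases h : (List.range (26 ^ len)).find? (fun i => !(used.contains (pvBuildA i len))) with
    | none =>
      have : (List.range (26 ^ len)).find?
          ((fun s => !used.contains s) ∘ fun i => pvBuildA i len) = none := h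
      rw [this]
      simpa using ih (len + 1)
    | some i =>
      have : (List.range (26 ^ len)).find?
          ((fun s => !used.contains s) ∘ fun i => pvBuildA i len) = some i := h
      rw [this]
      rfl

theorem pvGenB_eq_find (b f f1 : List String) (k n : Nat) :
    pvGenB b f f1 n k
      = ((pvCandB n k).find?
          (fun s => !(b.contains s) && !(f.contains s) && !(f1.contains s))).getD "" := by
  induction k generalizing n with
  | zero => simp [pvGenB, pvCandB]
  | succ k ih =>
    have hsplit : pvCandB n (k + 1) = String.mk (pvEnc n []) :: pvCandB (n + 1) k := by
      have : k + 1 = 1 + k := by omega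
      rw [this, pvCandB_split]
      simp [pvCandB]
    rw [hsplit]
    show (if !(b.contains (String.mk (pvEnc n []))) && !(f.contains (String.mk (pvEnc n [])))
            && !(f1.contains (String.mk (pvEnc n []))) then String.mk (pvEnc n [])
          else pvGenB b f f1 (n + 1) k) = _
    rw [List.find?_cons]
    by_cases hb : String.mk (pvEnc n []) ∈ b <;>
      by_cases hf : String.mk (pvEnc n []) ∈ f <;>
        by_cases hg : String.mk (pvEnc n []) ∈ f1 <;>
      simp [hb, hf, hg, ih]

theorem pvPred_eq (b f f1 : List String) (s : String) :
    (!((pvExtend (pvExtend b f) f1).contains s))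
      = (!(b.contains s) && !(f.contains s) && !(f1.contains s)) := by
  have h : s ∈ pvExtend (pvExtend b f) f1 ↔ s ∈ b ∨ s ∈ f ∨ s ∈ f1 := by
    rw [pvExtend_mem, pvExtend_mem, or_assoc]
  by_cases hb : s ∈ b <;> by_cases hf : s ∈ f <;> by_cases hf1 : s ∈ f1 <;>
    simp_all

-- ===== VERDICT (by name: the statement is the Claim_ definition above) =====
theorem generate_new_var_spec : Claim_equal_generate_new_var := by
  intro b f f1 _
  unfold Spec_generate_new_var generate_new_var generate_new_var_alt
  rw [pvGenA_eq_find, pvGenB_eq_find]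
  have hc : pvCandB 1 (pvFuelB 1 (b.length + f.length + f1.length + 1))
      = pvCandA 1 (b.length + f.length + f1.length + 1) := by
    have h := pvCandB_eq_pvCandA (b.length + f.length + f1.length + 1) 1
    simpa [pvC] using h
  rw [hc]
  have hp : (fun s => !((pvExtend (pvExtend b f) f1).contains s))
      = (fun s => !(b.contains s) && !(f.contains s) && !(f1.contains s)) :=
    funext (pvPred_eq b f f1)
  rw [hp]
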